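-- pv_equiv track=rewrite | github.com/GenomeNet/Genome-NAS | darts_tools/comp_aux.py | get_disc_edges
-- ===== SOURCE A (Python) =====
-- def get_disc_edges(rnn_steps, switch_rnn):
--     offset = 0
--     disc_edge = []
--     disc_cnt = 0
--
--     for i in range(rnn_steps):
--
--
--         for j in range(offset, offset+i+1):
--
--             if switch_rnn[j].count(False) == len(switch_rnn[j]):
--                 disc_cnt += 1
--
--             disc_edge.append(disc_cnt)
--
--         offset += i+1
--
--     return disc_edge
-- ===== SOURCE B (Python) =====
-- def get_disc_edges(rnn_steps, switch_rnn):
--     n = rnn_steps * (rnn_steps + 1) // 2 if rnn_steps > 0 else 0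
--     disc_pos = [j for j in range(n) if switch_rnn[j].count(False) == len(switch_rnn[j])]
--
--     def rank(x):
--         # bisect_right over the sorted position list: #positions <= x
--         lo, hi = 0, len(disc_pos)
--         while lo < hi:
--             mid = (lo + hi) // 2
--             if disc_pos[mid] <= x:
--                 lo = mid + 1
--             else:
--                 hi = mid
--         return lo
--
--     return [rank(j) for j in range(n)]
-- ===== Notes on version B (the rewrite author's own statement) =====
-- stated objective: alternative
-- what changed: Instead of nested loops with a running counter, B computes the closed-form edge count, collects the sorted list of positions of all-False rows, and answers each edge's cumulative count as a prefix-rank query via a hand-written bisect_right binary search.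
import Mathlib
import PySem

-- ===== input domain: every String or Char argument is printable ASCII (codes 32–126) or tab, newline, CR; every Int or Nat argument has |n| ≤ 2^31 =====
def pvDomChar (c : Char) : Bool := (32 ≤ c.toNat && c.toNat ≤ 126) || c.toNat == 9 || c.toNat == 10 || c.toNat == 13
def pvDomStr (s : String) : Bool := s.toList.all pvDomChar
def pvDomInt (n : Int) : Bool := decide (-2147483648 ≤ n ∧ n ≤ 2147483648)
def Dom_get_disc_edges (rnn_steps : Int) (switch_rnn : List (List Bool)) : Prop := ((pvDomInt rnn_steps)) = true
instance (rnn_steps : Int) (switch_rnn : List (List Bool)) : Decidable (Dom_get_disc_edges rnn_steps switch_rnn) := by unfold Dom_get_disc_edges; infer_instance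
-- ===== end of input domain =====

-- B replaces A's nested loops + running counter by collecting the sorted list of
-- all-False edge positions and answering each cumulative count as a binary-search
-- rank query (objective: alternative algorithm; no running accumulator).

-- ===== PORT A =====
-- the body of A's inner j-loop, updating (disc_edge, disc_cnt);
-- switch_rnn[j] is ported with pyGetD (Pre_ keeps every accessed index in range)
def pvStepA (switch_rnn : List (List Bool)) (st : List Int × Int) (j : Int) : List Int × Int :=
  let row := PySem.List.pyGetD switch_rnn j []
  let disc_cnt := if PySem.List.count row false = (row.length : Int) then st.2 + 1 else st.2
  (st.1 ++ [disc_cnt], disc_cnt)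

def get_disc_edges (rnn_steps : Int) (switch_rnn : List (List Bool)) : List Int :=
  let fin := (PySem.List.pyRange 0 rnn_steps 1).foldl
    (fun (st : Int × (List Int × Int)) i =>
      let offset := st.1
      let inner := (PySem.List.pyRange offset (offset + i + 1) 1).foldl (pvStepA switch_rnn) st.2
      (offset + i + 1, inner))
    (0, ([], 0))
  fin.2.1

-- ===== PORT B =====
-- Source B's hand-written bisect_right loop: lo/hi stay nonnegative Python ints, so Nat
-- with Nat division matches '(lo+hi)//2' exactly; disc_pos[mid] is always in range
-- (0 ≤ lo ≤ mid < hi ≤ len), ported with getD.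
def pvRankGo (ps : List Int) (x : Int) (lo hi : Nat) : Nat :=
  if h : lo < hi then
    let mid := (lo + hi) / 2
    if ps.getD mid 0 ≤ x then pvRankGo ps x (mid + 1) hi else pvRankGo ps x lo mid
  else lo
termination_by hi - lo
decreasing_by
  · have h1 : lo ≤ (lo + hi) / 2 := Nat.le_div_iff_mul_le (by omega) |>.mpr (by omega)
    omega
  · have h2 : (lo + hi) / 2 < hi := Nat.div_lt_iff_lt_mul (by omega) |>.mpr (by omega)
    omega

def get_disc_edges_alt (rnn_steps : Int) (switch_rnn : List (List Bool)) : List Int :=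
  let n : Int := if rnn_steps > 0 then PySem.Int.floordiv (rnn_steps * (rnn_steps + 1)) 2 else 0
  let disc_pos : List Int := (PySem.List.pyRange 0 n 1).filter (fun j =>
    let row := PySem.List.pyGetD switch_rnn j []
    decide (PySem.List.count row false = (row.length : Int)))
  (PySem.List.pyRange 0 n 1).map (fun j => ((pvRankGo disc_pos j 0 disc_pos.length : Nat) : Int))

-- ===== PRECONDITION & SPEC =====
-- Pre_ excludes exactly the inputs where Python A raises IndexError:
-- the triangular number of edges must not exceed len(switch_rnn).
def Pre_get_disc_edges (rnn_steps : Int) (switch_rnn : List (List Bool)) : Prop :=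
  rnn_steps ≤ 0 ∨ rnn_steps * (rnn_steps + 1) ≤ 2 * (switch_rnn.length : Int)
instance (rnn_steps : Int) (switch_rnn : List (List Bool)) : Decidable (Pre_get_disc_edges rnn_steps switch_rnn) := by unfold Pre_get_disc_edges; infer_instance

def pvWitness_get_disc_edges : Int × List (List Bool) :=
  (2, [[false], [true, false], [false, false]])

def Spec_get_disc_edges (rnn_steps : Int) (switch_rnn : List (List Bool)) (out : List Int) : Prop := out = get_disc_edges_alt rnn_steps switch_rnn
instance (rnn_steps : Int) (switch_rnn : List (List Bool)) (out : List Int) : Decidable (Spec_get_disc_edges rnn_steps switch_rnn out) := by unfold Spec_get_disc_edges; infer_instance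

-- ===== CLAIM (what is proved, stated in full; the proofs are below) =====
def Claim_equal_get_disc_edges : Prop := ∀ (rnn_steps : Int) (switch_rnn : List (List Bool)), Dom_get_disc_edges rnn_steps switch_rnn → Pre_get_disc_edges rnn_steps switch_rnn → Spec_get_disc_edges rnn_steps switch_rnn (get_disc_edges rnn_steps switch_rnn)

-- ===== LEMMAS AND PROOFS =====

-- the per-edge all-False test, as a Bool
def pvP (switch_rnn : List (List Bool)) (j : Int) : Bool :=
  let row := PySem.List.pyGetD switch_rnn j []
  decide (PySem.List.count row false = (row.length : Int))

-- cumulative count of all-False edges among indices [0, t)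
def pvCnt (switch_rnn : List (List Bool)) (t : Int) : Int :=
  (((PySem.List.pyRange 0 t 1).countP (pvP switch_rnn)) : Int)

-- A's outer fold flattens to one fold over the whole index range 0..tri n
theorem pvOuter_flatten (switch_rnn : List (List Bool)) (n : Nat) :
    ((PySem.List.pyRange 0 (n : Int) 1).foldl
      (fun (st : Int × (List Int × Int)) i =>
        let offset := st.1
        let inner := (PySem.List.pyRange offset (offset + i + 1) 1).foldl (pvStepA switch_rnn) st.2
        (offset + i + 1, inner))
      (0, ([], 0)))
    = (((n : Int) * ((n : Int) + 1)) / 2,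
       (PySem.List.pyRange 0 (((n : Int) * ((n : Int) + 1)) / 2) 1).foldl (pvStepA switch_rnn) ([], 0)) := by
  induction n with
  | zero => simp [PySem.List.pyRange_one_eq_nil]
  | succ m ih =>
      have hf : ((m : Int) + 1) * (((m : Int) + 1) + 1)
          = (m : Int) * ((m : Int) + 1) + 2 * ((m : Int) + 1) := by ring
      have h2 : (2 : Int) ∣ (m : Int) * ((m : Int) + 1) :=
        (Int.even_mul_succ_self (m : Int)).two_dvd
      have hmono : (0 : Int) ≤ (m : Int) * ((m : Int) + 1) / 2 := by positivity
      have htri : (m : Int) * ((m : Int) + 1) / 2 + ((m : Int) + 1)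
          = ((m : Int) + 1) * (((m : Int) + 1) + 1) / 2 := by omega
      rw [show ((m + 1 : Nat) : Int) = (m : Int) + 1 by push_cast; ring,
          PySem.List.pyRange_one_succ_right (by positivity), List.foldl_append, ih]
      simp only [List.foldl_cons, List.foldl_nil]
      rw [← htri]
      have hassoc : (m : Int) * ((m : Int) + 1) / 2 + (m : Int) + 1
          = (m : Int) * ((m : Int) + 1) / 2 + ((m : Int) + 1) := by ring
      rw [hassoc]
      refine Prod.ext rfl ?_
      rw [PySem.List.pyRange_one_append 0 ((m : Int) * ((m : Int) + 1) / 2)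
            ((m : Int) * ((m : Int) + 1) / 2 + ((m : Int) + 1)) hmono (by omega),
          List.foldl_append]

-- one more edge extends the cumulative count by the edge's indicator
theorem pvCnt_succ (sw : List (List Bool)) (m : Nat) :
    pvCnt sw ((m : Int) + 1) = pvCnt sw (m : Int) + (if pvP sw (m : Int) then 1 else 0) := by
  unfold pvCnt
  rw [PySem.List.pyRange_one_succ_right (by positivity), List.countP_append]
  by_cases h : pvP sw (m : Int) <;> simp [h]

-- the flat fold of A's step produces the list of cumulative counts
theorem pvFoldA (switch_rnn : List (List Bool)) (m : Nat) :
    (PySem.List.pyRange 0 (m : Int) 1).foldl (pvStepA switch_rnn) ([], 0)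
    = ((PySem.List.pyRange 0 (m : Int) 1).map (fun j => pvCnt switch_rnn (j + 1)),
       pvCnt switch_rnn (m : Int)) := by
  induction m with
  | zero => simp [PySem.List.pyRange_one_eq_nil, pvCnt]
  | succ m ih =>
      rw [show ((m + 1 : Nat) : Int) = (m : Int) + 1 by push_cast; ring,
          PySem.List.pyRange_one_succ_right (by positivity), List.foldl_append, ih,
          List.map_append]
      simp only [List.foldl_cons, List.foldl_nil, List.map_cons, List.map_nil]
      rw [pvCnt_succ]
      simp only [pvStepA, pvP]
      simp
      split_ifs <;> omega

-- countP of the prefix property is determined by a split point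
theorem pvCountP_split (ps : List Int) (x : Int) (k : Nat) (hk : k ≤ ps.length)
    (h1 : ∀ i (h : i < ps.length), i < k → ps[i] ≤ x)
    (h2 : ∀ i (h : i < ps.length), k ≤ i → x < ps[i]) :
    ps.countP (fun a => decide (a ≤ x)) = k := by
  have hsplit : ps = ps.take k ++ ps.drop k := (List.take_append_drop k ps).symm
  rw [hsplit, List.countP_append]
  have ht : (ps.take k).countP (fun a => decide (a ≤ x)) = (ps.take k).length := by
    rw [List.countP_eq_length]
    intro a ha
    obtain ⟨i, hi, rfl⟩ := List.mem_iff_getElem.mp ha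
    have hlt : i < ps.length ∧ i < k := by
      have := List.length_take (l := ps) (i := k); omega
    rw [List.getElem_take]
    simpa using h1 i hlt.1 hlt.2
  have hd : (ps.drop k).countP (fun a => decide (a ≤ x)) = 0 := by
    rw [List.countP_eq_zero]
    intro a ha
    obtain ⟨i, hi, rfl⟩ := List.mem_iff_getElem.mp ha
    rw [List.getElem_drop]
    simpa using h2 (k + i) (by have := List.length_drop (l := ps) (i := k); omega) (by omega)
  rw [ht, hd, List.length_take]
  omega

-- the binary search computes the number of elements ≤ x of a sorted list
theorem pvRankGo_spec (ps : List Int) (x : Int) (hs : ps.Pairwise (· ≤ ·))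
    (lo hi : Nat) (hle : lo ≤ hi) (hhi : hi ≤ ps.length)
    (h1 : ∀ i (h : i < ps.length), i < lo → ps[i] ≤ x)
    (h2 : ∀ i (h : i < ps.length), hi ≤ i → x < ps[i]) :
    pvRankGo ps x lo hi = ps.countP (fun a => decide (a ≤ x)) := by
  have hmono : ∀ i j (hi' : i < ps.length) (hj : j < ps.length), i ≤ j → ps[i] ≤ ps[j] := by
    intro i j hi' hj hij
    rcases Nat.lt_or_ge i j with h | h
    · exact (List.pairwise_iff_getElem.mp hs) i j hi' hj h
    · have : i = j := by omega
      subst this; exact le_refl _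
  induction hd : hi - lo using Nat.strong_induction_on generalizing lo hi with
  | _ d ih =>
    rw [pvRankGo]
    by_cases hlt : lo < hi
    · have hmidlo : lo ≤ (lo + hi) / 2 := Nat.le_div_iff_mul_le (by omega) |>.mpr (by omega)
      have hmidhi : (lo + hi) / 2 < hi := Nat.div_lt_iff_lt_mul (by omega) |>.mpr (by omega)
      have hmlen : (lo + hi) / 2 < ps.length := by omega
      rw [dif_pos hlt]
      simp only [List.getD_eq_getElem?_getD, List.getElem?_eq_getElem hmlen, Option.getD_some]
      split_ifs with hcmp
      · refine ih (hi - ((lo + hi) / 2 + 1)) (by omega) ((lo + hi) / 2 + 1) hi (by omega) hhi ?_ h2 rfl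
        intro i h hi'
        exact le_trans (hmono i ((lo + hi) / 2) h hmlen (by omega)) hcmp
      · refine ih ((lo + hi) / 2 - lo) (by omega) lo ((lo + hi) / 2) (by omega) (by omega) h1 ?_ rfl
        intro i h hi'
        exact lt_of_lt_of_le (lt_of_not_ge hcmp) (hmono ((lo + hi) / 2) i hmlen h hi')
    · rw [dif_neg hlt]
      have : lo = hi := by omega
      subst this
      exact (pvCountP_split ps x lo (by omega) h1 h2).symm

-- the two ports agree on EVERY input (outside Pre_ Python raises; the ports
-- both use the default [] there, so equality still holds)
theorem pvPorts_agree (rnn_steps : Int) (switch_rnn : List (List Bool)) :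
    get_disc_edges rnn_steps switch_rnn = get_disc_edges_alt rnn_steps switch_rnn := by
  dsimp only [get_disc_edges, get_disc_edges_alt]
  by_cases hpos : 0 < rnn_steps
  · obtain ⟨n, rfl⟩ : ∃ n : Nat, rnn_steps = (n : Int) :=
      ⟨rnn_steps.toNat, (Int.toNat_of_nonneg hpos.le).symm⟩
    rw [pvOuter_flatten, if_pos hpos, PySem.Int.floordiv_eq_ediv_of_pos (by omega)]
    set T : Int := (n : Int) * ((n : Int) + 1) / 2 with hT
    have hT0 : 0 ≤ T := by positivity
    obtain ⟨t, ht⟩ : ∃ t : Nat, T = (t : Int) := ⟨T.toNat, (Int.toNat_of_nonneg hT0).symm⟩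
    rw [ht, pvFoldA]
    set ps : List Int := (PySem.List.pyRange 0 ((t : Nat) : Int) 1).filter (fun j =>
      let row := PySem.List.pyGetD switch_rnn j []
      decide (PySem.List.count row false = (row.length : Int))) with hps
    have hpsP : ps = (PySem.List.pyRange 0 ((t : Nat) : Int) 1).filter (pvP switch_rnn) := rfl
    have hsorted : ps.Pairwise (· ≤ ·) := by
      rw [hpsP]
      exact (PySem.List.pairwise_lt_pyRange_one 0 ((t : Nat) : Int)).filter _ |>.imp le_of_lt
    apply List.map_congr_left
    intro j hj
    obtain ⟨hj0, hjT⟩ := (PySem.List.mem_pyRange_one).mp hj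
    have hrank : pvRankGo ps j 0 ps.length = ps.countP (fun a => decide (a ≤ j)) :=
      pvRankGo_spec ps j hsorted 0 ps.length (Nat.zero_le _) le_rfl
        (fun i h hi' => absurd hi' (Nat.not_lt_zero i))
        (fun i h hi' => absurd h (by omega))
    have hcount : ps.countP (fun a => decide (a ≤ j)) = (PySem.List.pyRange 0 (j + 1) 1).countP (pvP switch_rnn) := by
      rw [hpsP, List.countP_filter,
          PySem.List.pyRange_one_append 0 (j + 1) ((t : Nat) : Int) (by omega) (by omega),
          List.countP_append]
      have hfst : (PySem.List.pyRange 0 (j + 1) 1).countP (fun a => decide (a ≤ j) && pvP switch_rnn a)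
          = (PySem.List.pyRange 0 (j + 1) 1).countP (pvP switch_rnn) := by
        apply List.countP_congr
        intro k hk
        obtain ⟨hk0, hk1⟩ := (PySem.List.mem_pyRange_one).mp hk
        simp [show k ≤ j by omega]
      have hsnd : (PySem.List.pyRange (j + 1) ((t : Nat) : Int) 1).countP (fun a => decide (a ≤ j) && pvP switch_rnn a) = 0 := by
        rw [List.countP_eq_zero]
        intro k hk
        obtain ⟨hk0, hk1⟩ := (PySem.List.mem_pyRange_one).mp hk
        simp [show ¬ (k ≤ j) by omega]
      rw [hfst, hsnd]
      omega
    rw [hrank, hcount]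
    rfl
  · rw [if_neg hpos, PySem.List.pyRange_one_eq_nil (by omega),
        PySem.List.pyRange_one_eq_nil (by omega)]
    rfl

-- ===== VERDICT (by name: the statement is the Claim_ definition above) =====
theorem get_disc_edges_spec : Claim_equal_get_disc_edges :=
  fun rnn_steps switch_rnn _ _ => pvPorts_agree rnn_steps switch_rnn
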